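-- pv_equiv track=rewrite | github.com/rosylu/python | Homework3.py | determine_season
-- ===== SOURCE A (Python) =====
-- def determine_season(month, day):
--
--     # The year is divided into four season: spring, summer, fall (or autumn) and winter.
--     # While the exact dates that the seasons change vary a little bit from year to
--     # year because of the way that the calender is constructed, we will use the following
--     # dates for this exercise:
--
--     # Season  -- First Day
--     # Spring  -- March 20
--     # Summer  -- June 21
--     # Fall  -- September 22
--     # Winter    -- December 21
--
--     # Complete this function which takes as its inputs a month and day. It should
--     # output the season.
--     # input 1: month -- str
--     # input 2: day -- int
--
--     # output: month -- str (Spring, Summer, Fall, Winter)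
--
--     # YOUR CODE HERE
--     # Init
--     seasons = ['Spring', 'Summer', 'Fall', 'Winter']
--     months = ['January', 'Febuary', 'March', 'April', 'May', 'June',
--               'July', 'August', 'September', 'October','November', 'December']
--
--     season_c = 3
--     month_c = 1
--
--     for mon in range(12):
--         if (months[mon] =='March' and day >= 20) or mon > 2:
--             season_c = 0
--         if (months[mon] =='June' and day >= 21) or mon > 5:
--             season_c = 1
--         if (months[mon] =='September' and day >= 22) or mon > 8:
--             season_c = 2
--         if (months[mon] =='December' and day >= 21) or mon > 11:
--             season_c = 3
--         if months[mon] == month: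
--             break
--
--     return(seasons[season_c])
-- ===== SOURCE B (Python) =====
-- def determine_season(month, day):
--     # Flat decision from a single dict lookup; unknown months (including the
--     # correctly spelled 'February') default to 12 and thus behave as December.
--     nums = {'January': 1, 'Febuary': 2, 'March': 3, 'April': 4, 'May': 5,
--             'June': 6, 'July': 7, 'August': 8, 'September': 9, 'October': 10,
--             'November': 11, 'December': 12}
--     m = nums.get(month, 12)
--     if m <= 2 or (m == 3 and day < 20):
--         return 'Winter'
--     if m <= 5 or (m == 6 and day < 21):
--         return 'Spring'
--     if m <= 8 or (m == 9 and day < 22):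
--         return 'Summer'
--     if m <= 11 or day < 21:
--         return 'Fall'
--     return 'Winter'
-- ===== Notes on version B (the rewrite author's own statement) =====
-- stated objective: simpler
-- what changed: Replaces the 12-iteration loop with overwriting season accumulators by a single month-number lookup (defaulting unknown names to December, as A's fall-through does) followed by a flat chain of boundary comparisons.
import Mathlib
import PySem

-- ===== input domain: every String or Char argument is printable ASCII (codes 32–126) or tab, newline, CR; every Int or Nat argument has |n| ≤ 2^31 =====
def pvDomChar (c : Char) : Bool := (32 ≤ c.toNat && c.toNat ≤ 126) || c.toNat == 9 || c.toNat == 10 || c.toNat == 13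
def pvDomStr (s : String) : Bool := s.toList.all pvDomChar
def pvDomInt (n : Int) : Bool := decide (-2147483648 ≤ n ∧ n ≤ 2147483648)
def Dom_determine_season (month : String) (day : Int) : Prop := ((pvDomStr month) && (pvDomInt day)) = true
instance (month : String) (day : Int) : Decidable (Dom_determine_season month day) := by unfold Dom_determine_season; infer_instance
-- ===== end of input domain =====

-- B replaces A's 12-iteration loop of overwriting season counters by one dict lookup
-- (unknown month names default to December, matching A's fall-through) and a flat
-- chain of boundary comparisons; objective: simpler.


-- ===== PORT A =====
def dsSeasons : List String := ["Spring", "Summer", "Fall", "Winter"]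
def dsMonths : List String :=
  ["January", "Febuary", "March", "April", "May", "June",
   "July", "August", "September", "October", "November", "December"]

-- the 'for mon in range(12): … if months[mon] == month: break' loop, carrying season_c
def dsLoop (month : String) (day : Int) : List Int → Int → Int
  | [], sc => sc
  | mon :: rest, sc =>
    let sc := if (PySem.List.pyGet? dsMonths mon = some "March" ∧ day ≥ 20) ∨ mon > 2 then 0 else sc
    let sc := if (PySem.List.pyGet? dsMonths mon = some "June" ∧ day ≥ 21) ∨ mon > 5 then 1 else sc
    let sc := if (PySem.List.pyGet? dsMonths mon = some "September" ∧ day ≥ 22) ∨ mon > 8 then 2 else sc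
    let sc := if (PySem.List.pyGet? dsMonths mon = some "December" ∧ day ≥ 21) ∨ mon > 11 then 3 else sc
    if PySem.List.pyGet? dsMonths mon = some month then sc else dsLoop month day rest sc

def determine_season (month : String) (day : Int) : String :=
  -- seasons[season_c]: season_c is provably one of 0..3, so the index never raises
  (PySem.List.pyGet? dsSeasons (dsLoop month day (PySem.List.pyRange 0 12 1) 3)).getD ""

-- ===== PORT B =====
def altNums : PySem.Dict String Int :=
  PySem.Dict.ofList
    [("January", 1), ("Febuary", 2), ("March", 3), ("April", 4), ("May", 5),
     ("June", 6), ("July", 7), ("August", 8), ("September", 9), ("October", 10),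
     ("November", 11), ("December", 12)]

def determine_season_alt (month : String) (day : Int) : String :=
  let m := PySem.Dict.getD altNums month 12
  if m ≤ 2 ∨ (m = 3 ∧ day < 20) then "Winter"
  else if m ≤ 5 ∨ (m = 6 ∧ day < 21) then "Spring"
  else if m ≤ 8 ∨ (m = 9 ∧ day < 22) then "Summer"
  else if m ≤ 11 ∨ day < 21 then "Fall"
  else "Winter"

-- ===== PRECONDITION & SPEC =====
def Spec_determine_season (month : String) (day : Int) (out : String) : Prop := out = determine_season_alt month day
instance (month : String) (day : Int) (out : String) : Decidable (Spec_determine_season month day out) := by unfold Spec_determine_season; infer_instance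

-- ===== CLAIM (what is proved, stated in full; the proofs are below) =====
def Claim_equal_determine_season : Prop := ∀ (month : String) (day : Int), Dom_determine_season month day → Spec_determine_season month day (determine_season month day)

-- ===== LEMMAS AND PROOFS =====
theorem dsRange_eval : PySem.List.pyRange 0 12 1 = [0,1,2,3,4,5,6,7,8,9,10,11] := by decide

-- ===== VERDICT (by name: the statement is the Claim_ definition above) =====
theorem determine_season_spec : Claim_equal_determine_season := by
  intro month day _
  unfold Spec_determine_season
  by_cases h1 : "January" = month
  · subst h1
    have hm : PySem.Dict.getD altNums "January" 12 = 1 := by decide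
    simp [determine_season, determine_season_alt, dsLoop, dsMonths, dsSeasons, hm, dsRange_eval,
          PySem.List.pyGet?, PySem.List.pyIdx?]
  by_cases h2 : "Febuary" = month
  · subst h2
    have hm : PySem.Dict.getD altNums "Febuary" 12 = 2 := by decide
    simp [determine_season, determine_season_alt, dsLoop, dsMonths, dsSeasons, hm, dsRange_eval,
          PySem.List.pyGet?, PySem.List.pyIdx?]
  by_cases h3 : "March" = month
  · subst h3
    have hm : PySem.Dict.getD altNums "March" 12 = 3 := by decide
    simp [determine_season, determine_season_alt, dsLoop, dsMonths, dsSeasons, hm, dsRange_eval,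
          PySem.List.pyGet?, PySem.List.pyIdx?]
    split_ifs <;> simp <;> omega
  by_cases h4 : "April" = month
  · subst h4
    have hm : PySem.Dict.getD altNums "April" 12 = 4 := by decide
    simp [determine_season, determine_season_alt, dsLoop, dsMonths, dsSeasons, hm, dsRange_eval,
          PySem.List.pyGet?, PySem.List.pyIdx?]
  by_cases h5 : "May" = month
  · subst h5
    have hm : PySem.Dict.getD altNums "May" 12 = 5 := by decide
    simp [determine_season, determine_season_alt, dsLoop, dsMonths, dsSeasons, hm, dsRange_eval,
          PySem.List.pyGet?, PySem.List.pyIdx?]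
  by_cases h6 : "June" = month
  · subst h6
    have hm : PySem.Dict.getD altNums "June" 12 = 6 := by decide
    simp [determine_season, determine_season_alt, dsLoop, dsMonths, dsSeasons, hm, dsRange_eval,
          PySem.List.pyGet?, PySem.List.pyIdx?]
    split_ifs <;> simp <;> omega
  by_cases h7 : "July" = month
  · subst h7
    have hm : PySem.Dict.getD altNums "July" 12 = 7 := by decide
    simp [determine_season, determine_season_alt, dsLoop, dsMonths, dsSeasons, hm, dsRange_eval,
          PySem.List.pyGet?, PySem.List.pyIdx?]
  by_cases h8 : "August" = month
  · subst h8
    have hm : PySem.Dict.getD altNums "August" 12 = 8 := by decide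
    simp [determine_season, determine_season_alt, dsLoop, dsMonths, dsSeasons, hm, dsRange_eval,
          PySem.List.pyGet?, PySem.List.pyIdx?]
  by_cases h9 : "September" = month
  · subst h9
    have hm : PySem.Dict.getD altNums "September" 12 = 9 := by decide
    simp [determine_season, determine_season_alt, dsLoop, dsMonths, dsSeasons, hm, dsRange_eval,
          PySem.List.pyGet?, PySem.List.pyIdx?]
    split_ifs <;> simp <;> omega
  by_cases h10 : "October" = month
  · subst h10
    have hm : PySem.Dict.getD altNums "October" 12 = 10 := by decide
    simp [determine_season, determine_season_alt, dsLoop, dsMonths, dsSeasons, hm, dsRange_eval,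
          PySem.List.pyGet?, PySem.List.pyIdx?]
  by_cases h11 : "November" = month
  · subst h11
    have hm : PySem.Dict.getD altNums "November" 12 = 11 := by decide
    simp [determine_season, determine_season_alt, dsLoop, dsMonths, dsSeasons, hm, dsRange_eval,
          PySem.List.pyGet?, PySem.List.pyIdx?]
  by_cases h12 : "December" = month
  · subst h12
    have hm : PySem.Dict.getD altNums "December" 12 = 12 := by decide
    simp [determine_season, determine_season_alt, dsLoop, dsMonths, dsSeasons, hm, dsRange_eval,
          PySem.List.pyGet?, PySem.List.pyIdx?]
    split_ifs <;> simp <;> omega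
  -- month matches none of the twelve names: the loop never breaks and B's lookup defaults to 12
  have ha : PySem.Dict.getD altNums month 12 = 12 := by
    have he : altNums = PySem.Dict.mk [("January", 1), ("Febuary", 2), ("March", 3), ("April", 4),
        ("May", 5), ("June", 6), ("July", 7), ("August", 8), ("September", 9), ("October", 10),
        ("November", 11), ("December", 12)] := by decide
    simp [he, PySem.Dict.getD_eq_get?_getD, PySem.Dict.get?,
          beq_iff_eq, h1, h2, h3, h4, h5, h6, h7, h8, h9, h10, h11, h12]
  simp [determine_season, determine_season_alt, dsLoop, dsMonths, dsSeasons, ha, dsRange_eval,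
        PySem.List.pyGet?, PySem.List.pyIdx?, h1, h2, h3, h4, h5, h6, h7, h8, h9, h10, h11, h12]
  split_ifs <;> simp <;> omega
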